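-- pv_equiv track=rewrite | github.com/YusufMertGenc/OrientAr-WebServer | app/llm_client.py | build_intent_prompt
-- ===== SOURCE A (Python) =====
-- from typing import List, Dict, Any, Optional
--
-- def build_intent_prompt(question: str, context_passages: List[str]) -> str:
--     trimmed: List[str] = []
--     total_chars = 0
--     LIMIT = 1400
--
--     for p in context_passages or []:
--         if not p:
--             continue
--         pp = p.strip()
--         if len(pp) > 500:
--             pp = pp[:500]
--         if total_chars + len(pp) > LIMIT:
--             break
--         trimmed.append(pp)
--         total_chars += len(pp)
--
--     context_text = (
--         "\n\n".join([f"[DOC {i+1}]\n{t}" for i, t in enumerate(trimmed)])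
--         if trimmed
--         else "No relevant campus info found."
--     )
--
--     return f"""
-- CONTEXT:
-- {context_text}
--
-- QUESTION:
-- {question}
--
-- Remember:
-- - Use only the context
-- - Keep the answer concise
-- - Output ONLY valid JSON
-- """.strip()
-- ===== SOURCE B (Python) =====
-- from typing import List
--
--
-- def build_intent_prompt(question: str, context_passages: List[str]) -> str:
--     # Stage 1: clean all passages up front.
--     cleaned = [p.strip()[:500] for p in (context_passages or []) if p]
--
--     # Stage 2: prefix sums of the cleaned lengths.
--     cums: List[int] = []
--     total = 0
--     for t in cleaned:
--         total += len(t)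
--         cums.append(total)
--
--     # Stage 3: binary search (bisect_right) for the cutoff count:
--     # prefix sums are nondecreasing, so the kept prefix is exactly
--     # the passages whose prefix sum is <= 1400.
--     lo, hi = 0, len(cums)
--     while lo < hi:
--         mid = (lo + hi) // 2
--         if 1400 < cums[mid]:
--             hi = mid
--         else:
--             lo = mid + 1
--
--     blocks = [f"[DOC {i+1}]\n{t}" for i, t in enumerate(cleaned[:lo])]
--     context_text = "\n\n".join(blocks) if blocks else "No relevant campus info found."
--
--     return f"""
-- CONTEXT:
-- {context_text}
--
-- QUESTION:
-- {question}
--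
-- Remember:
-- - Use only the context
-- - Keep the answer concise
-- - Output ONLY valid JSON
-- """.strip()
-- ===== Notes on version B (the rewrite author's own statement) =====
-- stated objective: alternative
-- what changed: Replaces A's stateful early-break scanning loop by a staged pipeline: clean all passages, build the prefix sums of their lengths, then find the cutoff count by a bisect_right-style BINARY SEARCH over the nondecreasing prefix sums and slice the cleaned list to that count; formatting emits the [DOC i] blocks in one comprehension.
import Mathlib
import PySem

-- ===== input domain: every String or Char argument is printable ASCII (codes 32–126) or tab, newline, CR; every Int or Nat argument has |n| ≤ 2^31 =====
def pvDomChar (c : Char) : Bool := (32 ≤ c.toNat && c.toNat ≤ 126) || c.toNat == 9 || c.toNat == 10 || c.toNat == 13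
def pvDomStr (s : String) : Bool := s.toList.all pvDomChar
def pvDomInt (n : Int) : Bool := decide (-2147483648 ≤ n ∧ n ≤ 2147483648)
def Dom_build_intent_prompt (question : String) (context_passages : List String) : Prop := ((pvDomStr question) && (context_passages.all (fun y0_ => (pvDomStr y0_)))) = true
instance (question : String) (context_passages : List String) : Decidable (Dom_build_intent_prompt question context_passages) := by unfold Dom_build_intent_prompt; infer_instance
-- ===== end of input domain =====

-- B replaces A's early-break running-total loop by clean-all / prefix-sums / binary-search cutoff (objective: alternative).

-- ===== PORT A =====
-- A's for-loop with continue/break, trimmed and total_chars as the loop state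
def pvALoop : List String → List String → Int → List String
  | [], trimmed, _ => trimmed
  | p :: rest, trimmed, total =>
    if p = "" then pvALoop rest trimmed total
    else
      let pp := PySem.Str.strip p
      let pp := if 500 < PySem.Str.len pp then PySem.Str.slice pp none (some 500) else pp
      if 1400 < total + PySem.Str.len pp then trimmed
      else pvALoop rest (trimmed ++ [pp]) (total + PySem.Str.len pp)

def build_intent_prompt (question : String) (context_passages : List String) : String :=
  let trimmed := pvALoop context_passages [] 0
  let context_text :=
    if trimmed ≠ [] then
      PySem.Str.join "\n\n"
        ((PySem.List.enumerate trimmed).map (fun it => "[DOC " ++ PySem.Int.toStr (it.1 + 1) ++ "]\n" ++ it.2))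
    else "No relevant campus info found."
  PySem.Str.strip
    ("\nCONTEXT:\n" ++ context_text ++ "\n\nQUESTION:\n" ++ question ++
     "\n\nRemember:\n- Use only the context\n- Keep the answer concise\n- Output ONLY valid JSON\n")

-- ===== PORT B =====
-- the prefix-sums loop (cums.append(total) with a running total)
def pvCums : List String → Int → List Int
  | [], _ => []
  | t :: rest, total => (total + PySem.Str.len t) :: pvCums rest (total + PySem.Str.len t)

-- Source B's hand-written bisect_right over the prefix sums; the index mid is always
-- in range by the loop invariant 0 ≤ lo ≤ mid < hi ≤ len, so getD's default is never used
def pvBisect (a : List Int) (lo hi : Int) : Int :=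
  if h : lo < hi then
    let mid := PySem.Int.floordiv (lo + hi) 2
    if 1400 < (PySem.List.pyGet? a mid).getD 0 then pvBisect a lo mid
    else pvBisect a (mid + 1) hi
  else lo
termination_by (hi - lo).toNat
decreasing_by
  all_goals
    have := PySem.Int.floordiv_two_mid_bounds (le_of_lt h)
    have hne : PySem.Int.floordiv (lo + hi) 2 ≠ hi := by
      intro he
      have := PySem.Int.floordiv_lt_iff_lt_mul (a := lo + hi) (b := 2) (q := hi) (by omega)
      omega
    omega

def build_intent_prompt_alt (question : String) (context_passages : List String) : String :=
  let cleaned := (context_passages.filter (fun p => p != "")).map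
      (fun p => PySem.Str.slice (PySem.Str.strip p) none (some 500))
  let cums := pvCums cleaned 0
  let lo := pvBisect cums 0 cums.length
  let blocks := (PySem.List.enumerate (PySem.List.slice cleaned none (some lo))).map
      (fun it => "[DOC " ++ PySem.Int.toStr (it.1 + 1) ++ "]\n" ++ it.2)
  let context_text :=
    if blocks ≠ [] then PySem.Str.join "\n\n" blocks
    else "No relevant campus info found."
  PySem.Str.strip
    ("\nCONTEXT:\n" ++ context_text ++ "\n\nQUESTION:\n" ++ question ++
     "\n\nRemember:\n- Use only the context\n- Keep the answer concise\n- Output ONLY valid JSON\n")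

-- ===== PRECONDITION & SPEC =====
def Spec_build_intent_prompt (question : String) (context_passages : List String) (out : String) : Prop := out = build_intent_prompt_alt question context_passages
instance (question : String) (context_passages : List String) (out : String) : Decidable (Spec_build_intent_prompt question context_passages out) := by unfold Spec_build_intent_prompt; infer_instance

-- ===== CLAIM =====
def Claim_equal_build_intent_prompt : Prop := ∀ (question : String) (context_passages : List String), Dom_build_intent_prompt question context_passages → Spec_build_intent_prompt question context_passages (build_intent_prompt question context_passages)

-- ===== LEMMAS AND PROOFS =====

-- pp[:500] is all of pp when len(pp) ≤ 500, so A's conditional truncation is B's unconditional slice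
lemma pvTrunc_eq (s : String) :
    (if 500 < PySem.Str.len s then PySem.Str.slice s none (some 500) else s) =
      PySem.Str.slice s none (some 500) := by
  split_ifs with h
  · rfl
  · apply String.toList_injective
    rw [PySem.Str.toList_slice]
    simp only [PySem.Chars.slice_eq_listSlice]
    rw [PySem.List.slice_to]
    · refine (List.take_of_length_le ?_).symm
      have := PySem.Str.len_eq s
      omega
    · omega

-- the prefix A's break loop keeps, as a function of the cleaned passages
def pvKeep : List String → Int → List String
  | [], _ => []
  | c :: cs, t =>
    if t + PySem.Str.len c ≤ 1400 then c :: pvKeep cs (t + PySem.Str.len c) else []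

lemma pvALoop_eq (ps : List String) (trimmed : List String) (total : Int) :
    pvALoop ps trimmed total =
      trimmed ++ pvKeep ((ps.filter (fun p => p != "")).map
        (fun p => PySem.Str.slice (PySem.Str.strip p) none (some 500))) total := by
  induction ps generalizing trimmed total with
  | nil => simp [pvALoop, pvKeep]
  | cons p ps ih =>
    by_cases hp : p = ""
    · simp [pvALoop, hp, ih]
    · have hfil : (p :: ps).filter (fun p => p != "") = p :: ps.filter (fun p => p != "") := by
        rw [List.filter_cons]; simp [hp]
      rw [hfil, List.map_cons]
      have hstep : pvALoop (p :: ps) trimmed total =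
          if 1400 < total + PySem.Str.len (PySem.Str.slice (PySem.Str.strip p) none (some 500))
          then trimmed
          else pvALoop ps (trimmed ++ [PySem.Str.slice (PySem.Str.strip p) none (some 500)])
                 (total + PySem.Str.len (PySem.Str.slice (PySem.Str.strip p) none (some 500))) := by
        simp only [pvALoop, if_neg hp]
        rw [pvTrunc_eq (PySem.Str.strip p)]
      rw [hstep]
      by_cases hlim : 1400 <
          total + PySem.Str.len (PySem.Str.slice (PySem.Str.strip p) none (some 500))
      · rw [if_pos hlim]
        rw [show pvKeep (PySem.Str.slice (PySem.Str.strip p) none (some 500) ::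
              List.map (fun p => PySem.Str.slice (PySem.Str.strip p) none (some 500))
                (List.filter (fun p => p != "") ps)) total = [] from by
          simp only [pvKeep, if_neg (not_le.mpr hlim)]]
        rw [List.append_nil]
      · rw [if_neg hlim, ih, List.append_assoc]
        rw [show pvKeep (PySem.Str.slice (PySem.Str.strip p) none (some 500) ::
              List.map (fun p => PySem.Str.slice (PySem.Str.strip p) none (some 500))
                (List.filter (fun p => p != "") ps)) total =
            PySem.Str.slice (PySem.Str.strip p) none (some 500) ::
              pvKeep (List.map (fun p => PySem.Str.slice (PySem.Str.strip p) none (some 500))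
                (List.filter (fun p => p != "") ps))
                (total + PySem.Str.len (PySem.Str.slice (PySem.Str.strip p) none (some 500))) from by
          simp only [pvKeep, if_pos (not_lt.mp hlim)]]
        rfl

-- every prefix sum starting at t is at least t (string lengths are nonnegative)
lemma pvCums_ge (cs : List String) (t : Int) : ∀ x ∈ pvCums cs t, t ≤ x := by
  induction cs generalizing t with
  | nil => simp [pvCums]
  | cons c cs ih =>
    intro x hx
    have hc : 0 ≤ PySem.Str.len c := by rw [PySem.Str.len_eq]; positivity
    simp only [pvCums, List.mem_cons] at hx
    rcases hx with rfl | hx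
    · omega
    · have := ih (t + PySem.Str.len c) x hx; omega

-- the kept prefix is the take of the takeWhile-length of the prefix sums
lemma pvKeep_take (cs : List String) (t : Int) :
    pvKeep cs t = cs.take ((pvCums cs t).takeWhile (fun x => decide (x ≤ 1400))).length := by
  induction cs generalizing t with
  | nil => rfl
  | cons c cs ih =>
    by_cases h : t + PySem.Str.len c ≤ 1400
    · simp only [pvKeep, pvCums, List.takeWhile_cons, if_pos h,
        if_pos (show decide (t + PySem.Str.len c ≤ 1400) = true from decide_eq_true h)]
      simp [ih]
    · simp only [pvKeep, pvCums, List.takeWhile_cons, if_neg h,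
        if_neg (show ¬ decide (t + PySem.Str.len c ≤ 1400) = true from by simpa using h)]
      simp

-- characterization of the takeWhile-length on a nondecreasing-from-t list of prefix sums
lemma pvChar (cs : List String) (t : Int) (i : Nat) (hi : i < (pvCums cs t).length) :
    ((pvCums cs t)[i] ≤ 1400) ↔
      i < ((pvCums cs t).takeWhile (fun x => decide (x ≤ 1400))).length := by
  induction cs generalizing t i with
  | nil => simp [pvCums] at hi
  | cons c cs ih =>
    show (((t + PySem.Str.len c) :: pvCums cs (t + PySem.Str.len c))[i]'hi ≤ 1400) ↔
      i < (((t + PySem.Str.len c) :: pvCums cs (t + PySem.Str.len c)).takeWhile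
            (fun x => decide (x ≤ 1400))).length
    have hi2 : i < ((t + PySem.Str.len c) :: pvCums cs (t + PySem.Str.len c)).length := hi
    rw [List.takeWhile_cons]
    by_cases h : t + PySem.Str.len c ≤ 1400
    · rw [if_pos (by simpa using h)]
      cases i with
      | zero => simpa using h
      | succ j =>
        have hj : j < (pvCums cs (t + PySem.Str.len c)).length := by
          simp only [List.length_cons] at hi2; omega
        simp only [List.getElem_cons_succ, List.length_cons]
        have := ih (t + PySem.Str.len c) j hj
        omega
    · rw [if_neg (by simpa using h)]
      simp only [List.length_nil]
      constructor
      · intro hle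
        exfalso
        cases i with
        | zero =>
          simp only [List.getElem_cons_zero] at hle
          omega
        | succ j =>
          have hj : j < (pvCums cs (t + PySem.Str.len c)).length := by
            simp only [List.length_cons] at hi2; omega
          have hmem : (pvCums cs (t + PySem.Str.len c))[j] ∈
              pvCums cs (t + PySem.Str.len c) := List.getElem_mem hj
          have := pvCums_ge cs (t + PySem.Str.len c) _ hmem
          simp only [List.getElem_cons_succ] at hle
          omega
      · omega

-- binary-search correctness via the cutoff characterization
lemma pvBisect_eq (a : List Int) (k : Nat) (lo hi : Int)
    (hk : ∀ (i : Nat) (h2 : i < a.length), (a[i] ≤ 1400) ↔ i < k)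
    (hlo0 : 0 ≤ lo) (hlo : lo ≤ (k : Int)) (hhi : (k : Int) ≤ hi) (hub : hi ≤ (a.length : Int)) :
    pvBisect a lo hi = (k : Int) := by
  by_cases h : lo < hi
  · rw [pvBisect, dif_pos h]
    have hmid := PySem.Int.floordiv_two_mid_bounds (le_of_lt h)
    have hne : PySem.Int.floordiv (lo + hi) 2 ≠ hi := by
      intro he
      have h2 := (PySem.Int.floordiv_lt_iff_lt_mul (a := lo + hi) (b := 2) (q := hi) (by omega)).2
        (by omega)
      omega
    set mid := PySem.Int.floordiv (lo + hi) 2 with hmiddef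
    have hmid0 : 0 ≤ mid := by omega
    obtain ⟨m, hm⟩ : ∃ m : Nat, mid = (m : Int) := ⟨mid.toNat, (Int.toNat_of_nonneg hmid0).symm⟩
    have hmlen : m < a.length := by omega
    have hget : (PySem.List.pyGet? a mid).getD 0 = a[m] := by
      rw [hm, PySem.List.pyGet?_natCast, List.getElem?_eq_getElem hmlen, Option.getD_some]
    by_cases hv : 1400 < (PySem.List.pyGet? a mid).getD 0
    · rw [if_pos hv]
      have hmk : ¬ (m < k) := by
        intro hmk
        have := (hk m hmlen).2 hmk
        omega
      exact pvBisect_eq a k lo mid hk hlo0 hlo (by omega) (by omega)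
    · rw [if_neg hv]
      have hmk : m < k := (hk m hmlen).1 (by omega)
      exact pvBisect_eq a k (mid + 1) hi hk (by omega) (by omega) hhi hub
  · rw [pvBisect, dif_neg h]; omega
termination_by (hi - lo).toNat
decreasing_by
  all_goals omega

-- ===== VERDICT =====
theorem build_intent_prompt_spec : Claim_equal_build_intent_prompt := by
  intro question context_passages _
  unfold Spec_build_intent_prompt build_intent_prompt build_intent_prompt_alt
  rw [pvALoop_eq]
  simp only [List.nil_append]
  set cleaned := (context_passages.filter (fun p => p != "")).map
      (fun p => PySem.Str.slice (PySem.Str.strip p) none (some 500)) with hcl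
  have hb : pvBisect (pvCums cleaned 0) 0 ((pvCums cleaned 0).length : Int) =
      ((((pvCums cleaned 0).takeWhile (fun x => decide (x ≤ 1400))).length : Nat) : Int) := by
    apply pvBisect_eq
    · intro i h2; exact pvChar cleaned 0 i h2
    · exact le_refl 0
    · exact_mod_cast Nat.zero_le _
    · exact_mod_cast (List.takeWhile_prefix _).length_le
    · exact le_refl _
  rw [hb, PySem.List.slice_to _ (by positivity), Int.toNat_natCast, ← pvKeep_take]
  by_cases hnil : pvKeep cleaned 0 = []
  · rw [hnil]
    simp [PySem.List.enumerate_nil]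
  · rw [if_pos hnil, if_pos (by
      cases hKK : pvKeep cleaned 0 with
      | nil => exact absurd hKK hnil
      | cons x xs => simp [PySem.List.enumerate_cons])]
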